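-- pv_equiv track=rewrite | github.com/JAYHN554/SPCC | exp2.py | pass_two
-- ===== SOURCE A (Python) =====
-- def pass_two(lines, MNT, MDT, ALA):
--     output = []
--     skip_macro = False
--
--     for i in range(len(lines)):
--         line = lines[i].strip()
--         if line == "MACRO":
--             skip_macro = True
--         elif line == "MEND":
--             skip_macro = False
--         elif skip_macro:
--             continue
--         else:
--             tokens = line.split()
--             if tokens and tokens[0] in MNT:
--                 macro_name = tokens[0]
--                 args = tokens[1:]
--                 arg_map = {f"#{idx}": val for idx, val in enumerate(args)}
--                 start = MNT[macro_name] + 1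
--                 for j in range(start, len(MDT)):
--                     if MDT[j] == "MEND":
--                         break
--                     exp_line = MDT[j]
--                     for key, val in arg_map.items():
--                         exp_line = exp_line.replace(key, val)
--                     output.append(exp_line)
--             else:
--                 output.append(line)
--     return output
-- ===== SOURCE B (Python) =====
-- def pass_two(lines, MNT, MDT, ALA):
--     # First pass: expand each macro's body (MDT lines from its start index up to MEND) once.
--     bodies = {}
--     for name, idx in MNT.items():
--         j = idx + 1
--         body = []
--         while j < len(MDT) and MDT[j] != "MEND":
--             body.append(MDT[j])
--             j += 1
--         bodies[name] = body
--     # Second pass: one walk over the source lines, macro calls just look the body up.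
--     output = []
--     skip_macro = False
--     for raw in lines:
--         line = raw.strip()
--         if line == "MACRO":
--             skip_macro = True
--         elif line == "MEND":
--             skip_macro = False
--         elif skip_macro:
--             continue
--         else:
--             tokens = line.split()
--             if tokens and tokens[0] in bodies:
--                 arg_map = {f"#{idx}": val for idx, val in enumerate(tokens[1:])}
--                 for tmpl in bodies[tokens[0]]:
--                     for key, val in arg_map.items():
--                         tmpl = tmpl.replace(key, val)
--                     output.append(tmpl)
--             else:
--                 output.append(line)
--     return output
-- ===== Notes on version B (the rewrite author's own statement) =====
-- stated objective: alternative
-- what changed: B precomputes each macro's body from MDT once into a dict (first pass over MNT) and then walks the source lines directly, looking the expanded body up per call, instead of A's index loop over range(len(lines)) with a rescan of MDT from MNT[name]+1 on every macro call.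
-- outside the precondition, e.g. on pass_two([], {'M': -5}, [], {}): A returns [], B raises IndexError
import Mathlib
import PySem

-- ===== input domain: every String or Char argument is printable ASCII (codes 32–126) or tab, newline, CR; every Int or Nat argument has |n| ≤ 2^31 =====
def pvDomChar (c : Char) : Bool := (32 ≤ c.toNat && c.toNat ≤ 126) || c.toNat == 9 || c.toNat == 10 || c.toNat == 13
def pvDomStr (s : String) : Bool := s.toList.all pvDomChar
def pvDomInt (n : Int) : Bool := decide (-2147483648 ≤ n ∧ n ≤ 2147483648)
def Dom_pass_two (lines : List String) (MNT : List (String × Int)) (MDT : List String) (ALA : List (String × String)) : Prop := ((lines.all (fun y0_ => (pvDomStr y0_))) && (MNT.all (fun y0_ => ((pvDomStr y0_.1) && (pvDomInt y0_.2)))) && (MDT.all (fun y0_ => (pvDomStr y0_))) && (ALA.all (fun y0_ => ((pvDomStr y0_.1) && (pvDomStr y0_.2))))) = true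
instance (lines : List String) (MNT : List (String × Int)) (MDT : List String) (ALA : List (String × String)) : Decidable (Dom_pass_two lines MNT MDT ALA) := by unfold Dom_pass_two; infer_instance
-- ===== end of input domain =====

-- B precomputes every macro body once into a dict and walks the source lines directly,
-- instead of A's per-call rescan of MDT from MNT[name]+1 (objective: alternative decomposition).

-- shared helper: the '#idx -> val' argument map and the replace loop over its items
-- (this inner substitution loop is textually the same in both Pythons)
def pvArgMap (args : List String) : PySem.Dict String String :=
  (PySem.List.enumerate args 0).foldl
    (fun d p => d.insert ("#" ++ PySem.Int.toStr p.1) p.2) PySem.Dict.empty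

def pvSubst (am : PySem.Dict String String) (s : String) : String :=
  am.items.foldl (fun e p => PySem.Str.replace e p.1 p.2) s

-- ===== PORT A =====
-- A's inner expansion loop: 'for j in range(start, len(MDT)):' with break on "MEND"
def pvEmitA (MDT : List String) (am : PySem.Dict String String) : List Int → List String → List String
  | [], out => out
  | j :: js, out =>
    match PySem.List.pyGet? MDT j with
    | none => out   -- Python raises IndexError here; such inputs are outside Pre_
    | some s => if s = "MEND" then out else pvEmitA MDT am js (out ++ [pvSubst am s])

-- A's loop body for one source line (state = (output, skip_macro))
def pvStepA (MNT : List (String × Int)) (MDT : List String)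
    (st : List String × Bool) (raw : String) : List String × Bool :=
  let line := PySem.Str.strip raw
  if line = "MACRO" then (st.1, true)
  else if line = "MEND" then (st.1, false)
  else if st.2 then st
  else
    match PySem.Str.split₀ line with
    | [] => (st.1 ++ [line], st.2)
    | t0 :: args =>
      match (PySem.Dict.mk MNT).get? t0 with
      | none => (st.1 ++ [line], st.2)
      | some v =>
        (pvEmitA MDT (pvArgMap args) (PySem.List.pyRange (v + 1) (PySem.List.len MDT) 1) st.1, st.2)

def pass_two (lines : List String) (MNT : List (String × Int)) (MDT : List String) (ALA : List (String × String)) : List String :=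
  ((PySem.List.pyRange 0 (PySem.List.len lines) 1).foldl
    (fun st i => pvStepA MNT MDT st (PySem.List.pyGetD lines i "")) ([], false)).1

-- ===== PORT B =====
-- B's body extraction: 'while j < len(MDT) and MDT[j] != "MEND"'
def pvBody (MDT : List String) (j : Int) : List String :=
  if h : j < PySem.List.len MDT then
    match PySem.List.pyGet? MDT j with
    | none => []   -- Python raises IndexError here; such inputs are outside Pre_
    | some s => if s = "MEND" then [] else s :: pvBody MDT (j + 1)
  else []
termination_by ((PySem.List.len MDT) - j).toNat
decreasing_by simp only [PySem.List.len_eq] at *; omega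

-- B's second pass: direct walk over the source lines
def pvGoB (bodies : PySem.Dict String (List String)) : List String → List String × Bool → List String
  | [], st => st.1
  | raw :: rest, st =>
    let line := PySem.Str.strip raw
    if line = "MACRO" then pvGoB bodies rest (st.1, true)
    else if line = "MEND" then pvGoB bodies rest (st.1, false)
    else if st.2 then pvGoB bodies rest st
    else
      match PySem.Str.split₀ line with
      | [] => pvGoB bodies rest (st.1 ++ [line], st.2)
      | t0 :: args =>
        match bodies.get? t0 with
        | none => pvGoB bodies rest (st.1 ++ [line], st.2)
        | some body => pvGoB bodies rest (st.1 ++ body.map (pvSubst (pvArgMap args)), st.2)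

def pass_two_alt (lines : List String) (MNT : List (String × Int)) (MDT : List String) (ALA : List (String × String)) : List String :=
  pvGoB (MNT.foldl (fun d p => d.insert p.1 (pvBody MDT (p.2 + 1))) PySem.Dict.empty) lines ([], false)

-- ===== PRECONDITION & SPEC =====
-- Pre_ excludes MNT entries whose body start index idx+1 lies before -len(MDT) — Python list
-- indexing raises IndexError on such an index (A whenever that macro is called, B already when
-- precomputing its body) — and MNT lists with duplicate names, which do not represent a Python dict.
def Pre_pass_two (lines : List String) (MNT : List (String × Int)) (MDT : List String) (ALA : List (String × String)) : Prop :=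
  (MNT.map Prod.fst).Nodup ∧ ∀ p ∈ MNT, -(MDT.length : Int) ≤ p.2 + 1
instance (lines : List String) (MNT : List (String × Int)) (MDT : List String) (ALA : List (String × String)) : Decidable (Pre_pass_two lines MNT MDT ALA) := by unfold Pre_pass_two; infer_instance

def pvWitness_pass_two : List String × (List (String × Int)) × List String × (List (String × String)) :=
  (["INCR A B", "X"], [("INCR", 0)], ["INCR", "ADD #0", "SUB #1", "MEND"], [])

def Spec_pass_two (lines : List String) (MNT : List (String × Int)) (MDT : List String) (ALA : List (String × String)) (out : List String) : Prop := out = pass_two_alt lines MNT MDT ALA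
instance (lines : List String) (MNT : List (String × Int)) (MDT : List String) (ALA : List (String × String)) (out : List String) : Decidable (Spec_pass_two lines MNT MDT ALA out) := by unfold Spec_pass_two; infer_instance

-- ===== CLAIM (what is proved, stated in full; the proofs are below) =====
def Claim_equal_pass_two : Prop := ∀ (lines : List String) (MNT : List (String × Int)) (MDT : List String) (ALA : List (String × String)), Dom_pass_two lines MNT MDT ALA → Pre_pass_two lines MNT MDT ALA → Spec_pass_two lines MNT MDT ALA (pass_two lines MNT MDT ALA)

-- ===== LEMMAS AND PROOFS =====

-- A's break-at-MEND scan over range(j, len(MDT)) emits exactly B's precomputed body, substituted.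
theorem pvEmitA_eq_body (MDT : List String) (am : PySem.Dict String String) :
    ∀ (n : Nat) (j : Int) (out : List String), ((MDT.length : Int) - j).toNat = n →
      pvEmitA MDT am (PySem.List.pyRange j (MDT.length : Int) 1) out
        = out ++ (pvBody MDT j).map (pvSubst am) := by
  intro n
  induction n with
  | zero =>
    intro j out hn
    have hj : (MDT.length : Int) ≤ j := by omega
    rw [PySem.List.pyRange_one_eq_nil hj]
    rw [pvBody]
    simp [PySem.List.len_eq, pvEmitA, not_lt.mpr hj]
  | succ n ih =>
    intro j out hn
    have hj : j < (MDT.length : Int) := by omega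
    rw [PySem.List.pyRange_one_cons hj]
    rw [pvBody]
    simp only [PySem.List.len_eq]
    rw [dif_pos hj]
    simp only [pvEmitA]
    cases hg : PySem.List.pyGet? MDT j with
    | none => simp
    | some s =>
      by_cases hm : s = "MEND"
      · simp [hm]
      · simp only [hm, if_false]
        rw [ih (j + 1) (out ++ [pvSubst am s]) (by omega)]
        simp

-- looking a name up in B's precomputed bodies dict = looking it up in MNT, body-expanded
theorem pvBodies_get? (MDT : List String) :
    ∀ (MNT : List (String × Int)) (d : PySem.Dict String (List String)),
      (∀ p ∈ MNT, d.contains p.1 = false) → (MNT.map Prod.fst).Nodup → ∀ (t0 : String),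
      (MNT.foldl (fun d p => d.insert p.1 (pvBody MDT (p.2 + 1))) d).get? t0
        = match (PySem.Dict.mk MNT).get? t0 with
          | some v => some (pvBody MDT (v + 1))
          | none => d.get? t0 := by
  intro MNT
  induction MNT with
  | nil => intro d _ _ t0; rfl
  | cons p rest ih =>
    intro d hfresh hnd t0
    have hnd' : (rest.map Prod.fst).Nodup := (List.nodup_cons.mp hnd).2
    have hp : p.1 ∉ rest.map Prod.fst := (List.nodup_cons.mp hnd).1
    simp only [List.foldl_cons]
    rw [ih (d.insert p.1 (pvBody MDT (p.2 + 1)))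
        (by
          intro q hq
          rw [PySem.Dict.contains_insert]
          have h1 : (q.1 == p.1) = false := by
            simp only [beq_eq_false_iff_ne]
            intro h; exact hp (h ▸ List.mem_map_of_mem hq)
          rw [h1, hfresh q (List.mem_cons_of_mem _ hq)]; rfl)
        hnd' t0]
    rw [PySem.Dict.get?_mk_cons]
    by_cases he : p.1 = t0
    · subst he
      have hrest : (PySem.Dict.mk rest).get? p.1 = none := by
        rw [PySem.Dict.get?_eq_none_iff_not_mem_keys]
        simpa [PySem.Dict.keys] using hp
      simp [hrest, PySem.Dict.get?_insert_self]
    · have hne : t0 ≠ p.1 := fun h => he h.symm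
      simp only [beq_iff_eq]
      rw [if_neg he]
      cases hr : (PySem.Dict.mk rest).get? t0 with
      | some v => simp
      | none => simp [PySem.Dict.get?_insert_of_ne _ _ hne]

-- the two per-line passes agree, line by line
theorem pvLoop_eq (MNT : List (String × Int)) (MDT : List String)
    (hnd : (MNT.map Prod.fst).Nodup) :
    ∀ (lines : List String) (st : List String × Bool),
      (lines.foldl (pvStepA MNT MDT) st).1
        = pvGoB (MNT.foldl (fun d p => d.insert p.1 (pvBody MDT (p.2 + 1))) PySem.Dict.empty) lines st := by
  intro lines
  induction lines with
  | nil => intro st; simp [pvGoB]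
  | cons raw rest ih =>
    intro st
    rw [List.foldl_cons, ih (pvStepA MNT MDT st raw)]
    show _ = pvGoB _ (raw :: rest) st
    rw [pvGoB]
    unfold pvStepA
    simp only []
    by_cases h1 : PySem.Str.strip raw = "MACRO"
    · simp [h1]
    · by_cases h2 : PySem.Str.strip raw = "MEND"
      · simp [h1, h2]
      · by_cases h3 : st.2
        · simp [h1, h2, h3]
        · simp only [h1, h2, h3, if_false, Bool.false_eq_true]
          cases hs : PySem.Str.split₀ (PySem.Str.strip raw) with
          | nil => rfl
          | cons t0 args =>
            dsimp only
            rw [pvBodies_get? MDT MNT PySem.Dict.empty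
                (by intro q _; simp [PySem.Dict.contains_empty]) hnd t0]
            cases hg : (PySem.Dict.mk MNT).get? t0 with
            | none => simp [PySem.Dict.get?_empty]
            | some v =>
              dsimp only
              rw [PySem.List.len_eq,
                  pvEmitA_eq_body MDT (pvArgMap args) ((MDT.length : Int) - (v + 1)).toNat (v + 1) st.1 rfl]

-- ===== VERDICT (by name: the statement is the Claim_ definition above) =====
theorem pass_two_spec : Claim_equal_pass_two := by
  intro lines MNT MDT ALA _ hpre
  unfold Spec_pass_two pass_two pass_two_alt
  rw [PySem.List.len_eq,
      PySem.List.foldl_pyRange_zero_pyGetD' lines "" (pvStepA MNT MDT) ([], false)]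
  exact pvLoop_eq MNT MDT hpre.1 lines ([], false)
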